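-- pv_equiv track=rewrite | github.com/lhysgithub/TSAD | zx_plot_abnormal.py | find_positive_segment
-- ===== SOURCE A (Python) =====
-- def find_positive_segment(data):
--     index_list = []
--     lens_list = []
--     find = 0
--     count = 0
--     for i in range(len(data)):
--         if int(data[i]) == 1:
--             if find == 0:
--                 index_list.append(i)
--             find = 1
--             count += 1
--         elif find == 1:
--             find = 0
--             lens_list.append(count)
--             count = 0
--     return index_list, lens_list
-- ===== SOURCE B (Python) =====
-- def find_positive_segment(data):
--     # run-scanner: jump over whole runs instead of a per-element flag machine
--     index_list = []
--     lens_list = []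
--     n = len(data)
--     pos = 0
--     while pos < n:
--         key = int(data[pos]) == 1
--         end = pos + 1
--         while end < n and (int(data[end]) == 1) == key:
--             end += 1
--         if key:
--             index_list.append(pos)
--             if end < n:
--                 lens_list.append(end - pos)
--         pos = end
--     return index_list, lens_list
-- ===== Notes on version B (the rewrite author's own statement) =====
-- stated objective: alternative
-- what changed: Replaced the per-element flag/counter state machine with a run scanner that jumps over each maximal run of equal-keyed elements at once, recording a run's start and (unless the run touches the end of the data) its length.
import Mathlib
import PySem

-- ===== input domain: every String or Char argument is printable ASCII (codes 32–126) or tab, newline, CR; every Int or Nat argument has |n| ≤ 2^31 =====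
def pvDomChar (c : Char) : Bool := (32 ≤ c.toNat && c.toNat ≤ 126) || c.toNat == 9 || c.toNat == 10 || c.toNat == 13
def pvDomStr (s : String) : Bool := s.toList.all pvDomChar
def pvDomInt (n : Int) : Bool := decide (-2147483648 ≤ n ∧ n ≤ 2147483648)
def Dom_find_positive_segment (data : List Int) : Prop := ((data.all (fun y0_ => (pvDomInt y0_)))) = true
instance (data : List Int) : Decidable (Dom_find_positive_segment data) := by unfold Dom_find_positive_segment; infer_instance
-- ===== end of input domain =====

-- B replaces A's per-element flag/counter state machine by a run scanner that jumps over
-- whole maximal runs; alternative decomposition, same O(n) cost.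


-- ===== PORT A =====
-- A's for-loop over i in range(len(data)) with state (index_list, lens_list, find, count),
-- transcribed as a structural recursion over the remaining suffix carrying the running index i.
def pvALoop (xs : List Int) (i : Int) (index_list lens_list : List Int)
    (find count : Int) : List Int × List Int :=
  match xs with
  | [] => (index_list, lens_list)
  | x :: rest =>
    if x = 1 then
      pvALoop rest (i + 1) (if find = 0 then index_list ++ [i] else index_list)
        lens_list 1 (count + 1)
    else if find = 1 then
      pvALoop rest (i + 1) index_list (lens_list ++ [count]) 0 0
    else
      pvALoop rest (i + 1) index_list lens_list find count

def find_positive_segment (data : List Int) : List Int × List Int :=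
  pvALoop data 0 [] [] 0 0

-- ===== PORT B =====
-- B's outer while-loop scans one maximal run per step: key = (head = 1), the inner while is
-- the takeWhile/dropWhile split, len = end - pos; the trailing run contributes no length.
def pvBGo (xs : List Int) (pos n : Int) : List Int × List Int :=
  match xs with
  | [] => ([], [])
  | x :: rest' =>
    let key := decide (x = 1)
    let grp := rest'.takeWhile (fun y => decide (y = 1) == key)
    let rest := rest'.dropWhile (fun y => decide (y = 1) == key)
    let len : Int := 1 + grp.length
    let r := pvBGo rest (pos + len) n
    if key then (pos :: r.1, if pos + len < n then len :: r.2 else r.2)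
    else r
termination_by xs.length
decreasing_by
  simp only [List.length_cons]
  exact Nat.lt_succ_of_le (List.length_dropWhile_le _ _)

def find_positive_segment_alt (data : List Int) : List Int × List Int :=
  pvBGo data 0 (data.length : Int)

-- ===== PRECONDITION & SPEC =====
def Spec_find_positive_segment (data : List Int) (out : List Int × List Int) : Prop := out = find_positive_segment_alt data
instance (data : List Int) (out : List Int × List Int) : Decidable (Spec_find_positive_segment data out) := by unfold Spec_find_positive_segment; infer_instance

-- ===== CLAIM (what is proved, stated in full; the proofs are below) =====
def Claim_equal_find_positive_segment : Prop := ∀ (data : List Int), Dom_find_positive_segment data → Spec_find_positive_segment data (find_positive_segment data)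

-- ===== LEMMAS AND PROOFS =====

-- A's loop over a block of 1s with find already 1: no appends, count grows by the block length.
lemma pvALoop_ones (g : List Int) : ∀ (rest : List Int) (i : Int) (I L : List Int) (c : Int),
    (∀ y ∈ g, y = 1) →
    pvALoop (g ++ rest) i I L 1 c = pvALoop rest (i + g.length) (I) L 1 (c + g.length) := by
  induction g with
  | nil => intro rest i I L c _; simp
  | cons x g ih =>
    intro rest i I L c h
    have hx : x = 1 := h x (by simp)
    simp only [List.cons_append, pvALoop]
    rw [if_pos hx, if_neg (by norm_num : ¬ ((1:Int) = 0))]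
    rw [ih rest (i + 1) I L (c + 1) (fun y hy => h y (by simp [hy]))]
    have e1 : i + 1 + (g.length : Int) = i + ((x :: g).length : Int) := by
      simp only [List.length_cons]; push_cast; ring
    have e2 : c + 1 + (g.length : Int) = c + ((x :: g).length : Int) := by
      simp only [List.length_cons]; push_cast; ring
    rw [e1, e2]

-- A's loop over a block of non-1s with find = 0: the state is untouched.
lemma pvALoop_zeros (g : List Int) : ∀ (rest : List Int) (i : Int) (I L : List Int),
    (∀ y ∈ g, y ≠ 1) →
    pvALoop (g ++ rest) i I L 0 0 = pvALoop rest (i + g.length) I L 0 0 := by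
  induction g with
  | nil => intro rest i I L _; simp
  | cons x g ih =>
    intro rest i I L h
    have hx : x ≠ 1 := h x (by simp)
    simp only [List.cons_append, pvALoop]
    rw [if_neg hx, if_neg (by norm_num : ¬ ((0:Int) = 1))]
    rw [ih rest (i + 1) I L (fun y hy => h y (by simp [hy]))]
    have e1 : i + 1 + (g.length : Int) = i + ((x :: g).length : Int) := by
      simp only [List.length_cons]; push_cast; ring
    rw [e1]

-- Main invariant: A's loop started at index pos in state (I, L, 0, 0) appends exactly B's
-- run-scanner output for the suffix, where n = pos + remaining length.
lemma pvMain : ∀ (k : Nat) (xs : List Int), xs.length ≤ k →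
    ∀ (pos n : Int) (I L : List Int), pos + xs.length = n →
    pvALoop xs pos I L 0 0 = (I ++ (pvBGo xs pos n).1, L ++ (pvBGo xs pos n).2) := by
  intro k
  induction k with
  | zero =>
    intro xs hk pos n I L _
    have : xs = [] := List.eq_nil_of_length_eq_zero (Nat.le_zero.mp hk)
    subst this; simp [pvALoop, pvBGo]
  | succ k ih =>
    intro xs hk pos n I L hn
    cases xs with
    | nil => simp [pvALoop, pvBGo]
    | cons x rest' =>
      have hrk : ∀ p : Int → Bool, (rest'.dropWhile p).length ≤ k := by
        intro p
        have h1 := List.length_dropWhile_le p rest'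
        have h2 : rest'.length ≤ k := by simpa using hk
        omega
      by_cases hx : x = 1
      · -- a run of 1s starts here
        subst hx
        set grp := rest'.takeWhile (fun y => decide (y = 1)) with hgrp
        set rest := rest'.dropWhile (fun y => decide (y = 1)) with hrest
        have hsplit : grp ++ rest = rest' := List.takeWhile_append_dropWhile
        have hgones : ∀ y ∈ grp, y = 1 := by
          intro y hy
          have := List.mem_takeWhile_imp hy
          simpa using this
        have hA : pvALoop ((1:Int) :: rest') pos I L 0 0
            = pvALoop rest (pos + 1 + grp.length) (I ++ [pos]) L 1 (1 + grp.length) := by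
          have h1 : pvALoop ((1:Int) :: rest') pos I L 0 0
              = pvALoop rest' (pos + 1) (I ++ [pos]) L 1 1 := by
            simp [pvALoop]
          rw [h1, ← hsplit, pvALoop_ones grp rest (pos + 1) (I ++ [pos]) L 1 hgones]
        have hB : pvBGo ((1:Int) :: rest') pos n
            = (pos :: (pvBGo rest (pos + (1 + (grp.length : Int))) n).1,
               if pos + (1 + (grp.length : Int)) < n then
                 (1 + (grp.length : Int)) :: (pvBGo rest (pos + (1 + (grp.length : Int))) n).2
               else (pvBGo rest (pos + (1 + (grp.length : Int))) n).2) := by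
          rw [pvBGo]
          norm_num [← hgrp, ← hrest]
        have hlen : rest'.length = grp.length + rest.length := by
          rw [← hsplit]; simp
        cases hrc : rest with
        | nil =>
          -- trailing run: reaches end of data
          have hge : ¬ (pos + (1 + (grp.length : Int)) < n) := by
            rw [← hn]
            simp only [List.length_cons, hlen, hrc, List.length_nil]
            push_cast; omega
          rw [hA, hrc, hB, hrc]
          simp only [pvALoop, pvBGo, if_neg hge]
          simp
        | cons y ys =>
          have hy1 : ¬ (y = 1) := by
            have h0 := List.head?_dropWhile_not (fun y => decide (y = 1)) rest'
            rw [← hrest, hrc] at h0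
            simpa using h0
          have hlt : pos + (1 + (grp.length : Int)) < n := by
            rw [← hn]
            simp only [List.length_cons, hlen, hrc]
            push_cast; omega
          -- flush: next element ends the run, count is appended
          have hflush : pvALoop rest (pos + 1 + grp.length) (I ++ [pos]) L 1 (1 + grp.length)
              = pvALoop rest (pos + 1 + grp.length) (I ++ [pos]) (L ++ [1 + (grp.length : Int)]) 0 0 := by
            rw [hrc]
            simp [pvALoop, hy1]
          have hpos' : (pos + (1 + (grp.length : Int))) + rest.length = n := by
            rw [← hn]; simp only [List.length_cons, hlen]; push_cast; ring
          rw [hA, hflush]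
          have hih := ih rest (hrest ▸ hrk _) (pos + (1 + (grp.length : Int))) n
            (I ++ [pos]) (L ++ [1 + (grp.length : Int)]) hpos'
          rw [show pos + 1 + (grp.length : Int) = pos + (1 + (grp.length : Int)) by ring, hih, hB]
          rw [if_pos hlt]
          simp
      · -- a run of non-1s starts here
        have hkey : decide (x = 1) = false := by simp [hx]
        set grp := rest'.takeWhile (fun y => decide (y = 1) == false) with hgrp
        set rest := rest'.dropWhile (fun y => decide (y = 1) == false) with hrest
        have hsplit : grp ++ rest = rest' := List.takeWhile_append_dropWhile
        have hgz : ∀ y ∈ grp, y ≠ 1 := by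
          intro y hy
          have := List.mem_takeWhile_imp hy
          simpa using this
        have hA : pvALoop (x :: rest') pos I L 0 0
            = pvALoop rest (pos + 1 + grp.length) I L 0 0 := by
          have h1 : pvALoop (x :: rest') pos I L 0 0 = pvALoop rest' (pos + 1) I L 0 0 := by
            simp [pvALoop, hx]
          rw [h1, ← hsplit, pvALoop_zeros grp rest (pos + 1) I L hgz]
        have hB : pvBGo (x :: rest') pos n = pvBGo rest (pos + (1 + (grp.length : Int))) n := by
          rw [pvBGo]
          simp only [hkey, ← hgrp, ← hrest, Bool.false_eq_true, if_false]
        have hlen : rest'.length = grp.length + rest.length := by rw [← hsplit]; simp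
        have hpos' : (pos + (1 + (grp.length : Int))) + rest.length = n := by
          rw [← hn]; simp only [List.length_cons, hlen]; push_cast; ring
        rw [hA, show pos + 1 + (grp.length : Int) = pos + (1 + (grp.length : Int)) by ring,
          ih rest (hrest ▸ hrk _) _ n I L hpos', hB]

-- ===== VERDICT (by name: the statement is the Claim_ definition above) =====
theorem find_positive_segment_spec : Claim_equal_find_positive_segment := by
  intro data _
  unfold Spec_find_positive_segment find_positive_segment find_positive_segment_alt
  rw [pvMain data.length data le_rfl 0 data.length [] [] (by simp)]
  simp
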